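-- pv_equiv track=rewrite | github.com/CFSAN-Biostatistics/kyos | kyos/nn.py | conv_allele
-- ===== SOURCE A (Python) =====
-- def conv_allele(allele):
--     """More efficient allele conversion using a dictionary."""
--     allele_map = {
--         "A": 0, "T": 1, "C": 2, "G": 3,
--         "A_insertion": 4, "T_insertion": 5, "C_insertion": 6, "G_insertion": 7,
--         "_deletion": 8
--     }
--     try:
--         return allele_map[allele.upper()]
--     except KeyError:
--         for key in allele_map:
--             if key.endswith("_insertion") and allele.upper().startswith(key[0]):
--                 return allele_map[key]
--         raise ValueError(f"Unknown allele: {allele}")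
-- ===== SOURCE B (Python) =====
-- def conv_allele(allele):
--     """Direct index arithmetic over the 4-letter base table (no dict, no key scan)."""
--     a = allele.upper()
--     if a == "_DELETION":
--         return 8
--     if a and a[0] in "ATCG":
--         return "ATCG".index(a[0]) + (0 if len(a) == 1 else 4)
--     raise ValueError(f"Unknown allele: {allele}")
-- ===== Notes on version B (the rewrite author's own statement) =====
-- stated objective: simpler
-- what changed: Replaces the 9-entry dictionary, try/except and linear key scan with a deletion-marker check plus direct .index arithmetic on the first uppercased character over the four-letter base table (+4 for multi-character alleles).
-- outside the precondition, e.g. on conv_allele('_DELETION'): A raises ValueError, B returns 8; on conv_allele('X_insertion'): A raises ValueError, B raises ValueError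
-- crash fix: A raises ValueError on any allele whose upper() is "_DELETION" (its "_deletion" dict entry is dead because upper() never produces lowercase keys); B returns the evidently intended code 8 there. — e.g. on conv_allele("_deletion"): A raises ValueError, B returns 8
import Mathlib
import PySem

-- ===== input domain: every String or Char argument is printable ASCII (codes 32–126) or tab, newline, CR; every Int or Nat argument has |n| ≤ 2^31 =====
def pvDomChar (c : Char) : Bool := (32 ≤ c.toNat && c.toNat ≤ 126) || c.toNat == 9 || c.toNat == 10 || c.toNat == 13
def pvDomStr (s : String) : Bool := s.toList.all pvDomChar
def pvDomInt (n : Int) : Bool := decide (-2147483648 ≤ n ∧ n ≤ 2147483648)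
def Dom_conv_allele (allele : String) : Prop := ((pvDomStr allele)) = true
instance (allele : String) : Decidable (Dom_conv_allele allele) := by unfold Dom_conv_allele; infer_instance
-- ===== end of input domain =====

-- B replaces A's dictionary + try/except + key-scanning loop by a '_DELETION' check and
-- direct "ATCG".index arithmetic on the first uppercased character (objective: simpler).

-- ===== PORT A =====
def convAlleleMap : List (String × Int) :=
  [("A",0),("T",1),("C",2),("G",3),
   ("A_insertion",4),("T_insertion",5),("C_insertion",6),("G_insertion",7),("_deletion",8)]

-- the 'for key in allele_map' loop of the except branch; [] = the final 'raise ValueError'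
-- (outside Pre_, the port returns 0 there).  key[0] is ported as the first character of the
-- key (String.ofList (k.toList.take 1)) — exact, since every key of the literal dict is nonempty.
def convAlleleLoop (u : String) : List (String × Int) → Int
  | [] => 0
  | (k, v) :: rest =>
    if PySem.Str.endswith k "_insertion" && PySem.Str.startswith u (String.ofList (k.toList.take 1)) then v
    else convAlleleLoop u rest

def conv_allele (allele : String) : Int :=
  match PySem.Dict.get? (PySem.Dict.ofList convAlleleMap) (PySem.Str.upper allele) with
  | some v => v
  | none => convAlleleLoop (PySem.Str.upper allele) convAlleleMap

-- ===== PORT B =====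
def conv_allele_alt (allele : String) : Int :=
  let a := PySem.Str.upper allele
  if a = "_DELETION" then 8
  else
    match PySem.Str.pyGet? a 0 with
    | some c =>
      if PySem.Str.isIn (String.ofList [c]) "ATCG" then
        PySem.Str.find "ATCG" (String.ofList [c]) + (if PySem.Str.len a = 1 then 0 else 4)
      else 0   -- 'raise ValueError' (outside Pre_)
    | none => 0 -- empty string: 'raise ValueError' (outside Pre_)

-- ===== PRECONDITION & SPEC =====
-- Pre_ excludes exactly the inputs on which A raises ValueError: the empty string and any
-- string whose first character does not uppercase to A/T/C/G (note A's "_deletion" and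
-- "X_insertion" dict entries are dead: upper() never yields a lowercase key).
def Pre_conv_allele (allele : String) : Prop :=
  allele.toList ≠ [] ∧
    PySem.Chars.upperChar (allele.toList.headD ' ') ∈ (['A', 'T', 'C', 'G'] : List Char)
instance (allele : String) : Decidable (Pre_conv_allele allele) := by
  unfold Pre_conv_allele; infer_instance
def pvWitness_conv_allele : String := "g"

-- A raises ValueError on any allele whose upper() is "_DELETION" (its "_deletion" dict entry
-- is dead because upper() never produces a lowercase key); B returns the intended code 8 there.
def Raises_conv_allele (allele : String) : Prop := PySem.Str.upper allele = "_DELETION"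
instance (allele : String) : Decidable (Raises_conv_allele allele) := by
  unfold Raises_conv_allele; infer_instance
def pvRaiseWitness_conv_allele : String := "_deletion"
def pvRaiseWitnessOut_conv_allele : Int := 8

def Spec_conv_allele (allele : String) (out : Int) : Prop := out = conv_allele_alt allele
instance (allele : String) (out : Int) : Decidable (Spec_conv_allele allele out) := by
  unfold Spec_conv_allele; infer_instance

-- ===== CLAIM (what is proved, stated in full; the proofs are below) =====
def Claim_equal_conv_allele : Prop := ∀ (allele : String), Dom_conv_allele allele → Pre_conv_allele allele → Spec_conv_allele allele (conv_allele allele)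
def Claim_raises_conv_allele : Prop := (∀ (allele : String), Dom_conv_allele allele → Raises_conv_allele allele → ¬ Pre_conv_allele allele) ∧ (Dom_conv_allele (pvRaiseWitness_conv_allele) ∧ Raises_conv_allele (pvRaiseWitness_conv_allele) ∧ conv_allele_alt (pvRaiseWitness_conv_allele) = pvRaiseWitnessOut_conv_allele)

-- ===== LEMMAS AND PROOFS =====

-- (s == t) on String is list equality of the underlying characters
theorem strBeq (s t : String) : (s == t) = (s.toList == t.toList) := by
  by_cases h : s = t
  · simp [h]
  · have h2 : s.toList ≠ t.toList := fun hc => h (String.ext_iff.mpr hc)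
    simp [h, h2]

-- upper() never yields a lowercase ASCII letter
theorem upperChar_not_lower (x c : Char) (hc : 97 ≤ c.toNat) (hc2 : c.toNat ≤ 122) :
    PySem.Chars.upperChar x ≠ c := by
  unfold PySem.Chars.upperChar PySem.Chars.islower
  split_ifs with h
  · simp only [decide_eq_true_eq, Bool.and_eq_true] at h
    have h1 : 97 ≤ x.toNat := h.1
    have h2 : x.toNat ≤ 122 := h.2
    intro he
    have h3 := congrArg Char.toNat he
    rw [Char.toNat_ofNat, if_pos (by left; omega)] at h3
    omega
  · simp only [decide_eq_true_eq, Bool.and_eq_true, not_and, not_le] at h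
    intro he
    rw [← he] at hc hc2
    exact absurd (h hc) (not_lt.mpr hc2)

theorem convAlleleItems :
    (PySem.Dict.ofList [(("A":String),(0:Int)),("T",1),("C",2),("G",3),("A_insertion",4),
      ("T_insertion",5),("C_insertion",6),("G_insertion",7),("_deletion",8)]).items
    = [("A",0),("T",1),("C",2),("G",3),("A_insertion",4),("T_insertion",5),("C_insertion",6),
       ("G_insertion",7),("_deletion",8)] := by decide

theorem conv_allele_spec : Claim_equal_conv_allele := by
  intro allele _ hpre
  unfold Spec_conv_allele
  obtain ⟨hne, hmem⟩ := hpre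
  rcases hl : allele.toList with _ | ⟨c, rest⟩
  · exact absurd hl hne
  rw [hl] at hmem
  simp only [List.headD_cons] at hmem
  have hup : PySem.Str.upper allele
      = String.ofList (List.map PySem.Chars.upperChar allele.toList) := by
    simp [PySem.Str.upper, PySem.Chars.upper]
  simp only [List.mem_cons, List.not_mem_nil, or_false] at hmem
  rcases rest with _ | ⟨r1, rest1⟩
  · rcases hmem with hu | hu | hu | hu <;>
      simp [conv_allele, conv_allele_alt, hup, hl, hu, PySem.Dict.get?, convAlleleItems,
        convAlleleMap, convAlleleLoop, PySem.Str.endswith, PySem.Str.startswith,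
        PySem.Chars.endswith, PySem.Chars.startswith, PySem.Str.pyGet?, PySem.Str.isIn,
        PySem.Str.find, PySem.Str.len, strBeq, String.ext_iff,
        List.isPrefixOf, List.isSuffixOf] <;> decide
  · rcases rest1 with _ | ⟨r2, rest2⟩
    · rcases hmem with hu | hu | hu | hu <;>
        simp [conv_allele, conv_allele_alt, hup, hl, hu, PySem.Dict.get?, convAlleleItems,
          convAlleleMap, convAlleleLoop, PySem.Str.endswith, PySem.Str.startswith,
          PySem.Chars.endswith, PySem.Chars.startswith, PySem.Str.pyGet?, PySem.Str.isIn,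
          PySem.Str.find, PySem.Str.len, strBeq, String.ext_iff, List.beq,
          List.isPrefixOf, List.isSuffixOf] <;> decide
    · have hi := Ne.symm (upperChar_not_lower r2 'i' (by decide) (by decide))
      have hne0 : (rest2.length : Int) + 1 + 1 ≠ 0 := by omega
      rcases hmem with hu | hu | hu | hu <;>
      · simp [conv_allele, conv_allele_alt, hup, hl, hu, PySem.Dict.get?, convAlleleItems,
          convAlleleMap, convAlleleLoop, PySem.Str.endswith, PySem.Str.startswith,
          PySem.Chars.endswith, PySem.Chars.startswith, PySem.Str.pyGet?, PySem.Str.isIn,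
          PySem.Str.find, PySem.Str.len, strBeq, String.ext_iff, hi,
          List.isPrefixOf, List.isSuffixOf]
        rw [if_neg hne0]
        decide

theorem conv_allele_raises : Claim_raises_conv_allele := by
  unfold Claim_raises_conv_allele
  constructor
  · intro allele _ hr hpre
    obtain ⟨hne, hmem⟩ := hpre
    rcases hl : allele.toList with _ | ⟨c, rest⟩
    · exact absurd hl hne
    have h2 := congrArg String.toList hr
    simp [PySem.Str.upper, PySem.Chars.upper, hl] at h2
    rw [hl] at hmem
    simp only [List.headD_cons] at hmem
    rw [h2.1] at hmem
    simp at hmem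
  · exact ⟨by decide, by decide, by decide⟩

-- self-check: the raise witness's B-value, read back off the raises claim
theorem conv_allele_raise_witness_ok :
    conv_allele_alt pvRaiseWitness_conv_allele = pvRaiseWitnessOut_conv_allele :=
  conv_allele_raises.2.2.2
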